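-- pv_equiv track=rewrite | github.com/xupeng211/FootballPrediction | src/api/optimization/database_performance_middleware.py | _determine_overall_priority
-- ===== SOURCE A (Python) =====
-- def _determine_overall_priority(
--     suggestions: list, complexity_score: int
-- ) -> str:
--     """确定整体优先级"""
--     if any(s["priority"] == "high" for s in suggestions) or complexity_score > 10:
--         return "high"
--     elif (
--         any(s["priority"] == "medium" for s in suggestions) or complexity_score > 5
--     ):
--         return "medium"
--     else:
--         return "low"
-- ===== SOURCE B (Python) =====
-- def _determine_overall_priority(suggestions: list, complexity_score: int) -> str:
--     score_level = 2 if complexity_score > 10 else 1 if complexity_score > 5 else 0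
--     sugg_level = 0
--     for s in suggestions:
--         p = s["priority"]
--         if p == "high":
--             sugg_level = 2
--         elif p == "medium" and sugg_level < 1:
--             sugg_level = 1
--     return ("low", "medium", "high")[max(score_level, sugg_level)]
-- ===== Notes on version B (the rewrite author's own statement) =====
-- stated objective: alternative
-- what changed: Replaces A's two separate any()-scans with short-circuit guards by a single pass computing a numeric suggestion level, combined with a numeric score level via max and mapped through a level table.
-- outside the precondition, e.g. on _determine_overall_priority([{'priority': 'high'}, {}], 0): A returns 'high', B raises KeyError
import Mathlib
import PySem

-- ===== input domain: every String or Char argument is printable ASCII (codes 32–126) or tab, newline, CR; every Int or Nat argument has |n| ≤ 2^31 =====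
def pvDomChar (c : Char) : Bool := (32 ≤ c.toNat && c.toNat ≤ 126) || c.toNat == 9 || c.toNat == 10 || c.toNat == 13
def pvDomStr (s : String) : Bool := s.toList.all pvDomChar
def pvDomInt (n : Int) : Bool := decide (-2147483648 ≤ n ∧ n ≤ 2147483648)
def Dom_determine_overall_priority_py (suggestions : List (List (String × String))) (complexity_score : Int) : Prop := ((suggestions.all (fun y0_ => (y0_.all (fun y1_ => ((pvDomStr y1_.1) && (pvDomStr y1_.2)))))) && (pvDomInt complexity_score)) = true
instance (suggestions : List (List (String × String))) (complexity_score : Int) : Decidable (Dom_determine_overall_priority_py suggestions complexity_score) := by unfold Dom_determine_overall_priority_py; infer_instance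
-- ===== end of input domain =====

-- B replaces A's two short-circuit any()-scans by one pass computing numeric levels combined with max (alternative decomposition; return-value equivalence on inputs whose dicts all carry the 'priority' key).


-- ===== PORT A =====
-- s["priority"]: first-match lookup in the association list (KeyError = none, excluded by Pre_).
def pvPrio (s : List (String × String)) : Option String :=
  (s.find? (fun kv => kv.1 == "priority")).map (·.2)

-- any(s["priority"] == v for s in suggestions), short-circuiting; getD is only reached under Pre_.
def pvAnyPrio (suggestions : List (List (String × String))) (v : String) : Bool :=
  suggestions.any (fun s => (pvPrio s).getD "" == v)

def determine_overall_priority_py (suggestions : List (List (String × String))) (complexity_score : Int) : String :=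
  if pvAnyPrio suggestions "high" || complexity_score > 10 then "high"
  else if pvAnyPrio suggestions "medium" || complexity_score > 5 then "medium"
  else "low"

-- ===== PORT B =====
-- the for-loop of Source B accumulating sugg_level
def pvSuggLevel (suggestions : List (List (String × String))) (acc : Nat) : Nat :=
  match suggestions with
  | [] => acc
  | s :: rest =>
      let p := (pvPrio s).getD ""
      pvSuggLevel rest (if p == "high" then 2 else if p == "medium" && decide (acc < 1) then 1 else acc)

-- ("low", "medium", "high")[i]
def pvLevelName (i : Nat) : String :=
  match i with
  | 0 => "low"
  | 1 => "medium"
  | _ => "high"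

def determine_overall_priority_py_alt (suggestions : List (List (String × String))) (complexity_score : Int) : String :=
  let score_level : Nat := if complexity_score > 10 then 2 else if complexity_score > 5 then 1 else 0
  let sugg_level := pvSuggLevel suggestions 0
  pvLevelName (max score_level sugg_level)

-- ===== PRECONDITION & SPEC =====
-- Pre_ excludes suggestion dicts missing the 'priority' key: there Python raises KeyError in both
-- programs, except that A's short-circuit can return before reaching the faulty dict (cited in claim.json).
def Pre_determine_overall_priority_py (suggestions : List (List (String × String))) (complexity_score : Int) : Prop :=
  ∀ s ∈ suggestions, "priority" ∈ s.map Prod.fst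

instance (suggestions : List (List (String × String))) (complexity_score : Int) : Decidable (Pre_determine_overall_priority_py suggestions complexity_score) := by unfold Pre_determine_overall_priority_py; infer_instance

def pvWitness_determine_overall_priority_py : (List (List (String × String))) × Int :=
  ([[("priority", "medium")], [("priority", "low")]], 3)

def Spec_determine_overall_priority_py (suggestions : List (List (String × String))) (complexity_score : Int) (out : String) : Prop := out = determine_overall_priority_py_alt suggestions complexity_score
instance (suggestions : List (List (String × String))) (complexity_score : Int) (out : String) : Decidable (Spec_determine_overall_priority_py suggestions complexity_score out) := by unfold Spec_determine_overall_priority_py; infer_instance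

-- ===== CLAIM (what is proved, stated in full; the proofs are below) =====
def Claim_equal_determine_overall_priority_py : Prop := ∀ (suggestions : List (List (String × String))) (complexity_score : Int), Dom_determine_overall_priority_py suggestions complexity_score → Pre_determine_overall_priority_py suggestions complexity_score → Spec_determine_overall_priority_py suggestions complexity_score (determine_overall_priority_py suggestions complexity_score)

-- ===== LEMMAS AND PROOFS =====

-- the pure suggestion level B's loop computes
def pvPureLevel (suggestions : List (List (String × String))) : Nat :=
  if pvAnyPrio suggestions "high" then 2 else if pvAnyPrio suggestions "medium" then 1 else 0

theorem pvAnyPrio_cons (s : List (String × String)) (rest : List (List (String × String))) (v : String) :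
    pvAnyPrio (s :: rest) v = (((pvPrio s).getD "" == v) || pvAnyPrio rest v) := by
  simp [pvAnyPrio]

theorem pvSuggLevel_eq_max (suggestions : List (List (String × String))) :
    ∀ acc, acc ≤ 2 → pvSuggLevel suggestions acc = max acc (pvPureLevel suggestions) := by
  induction suggestions with
  | nil => intro acc _; simp [pvSuggLevel, pvPureLevel, pvAnyPrio]
  | cons s rest ih =>
      intro acc hacc
      simp only [pvSuggLevel, pvPureLevel, pvAnyPrio_cons]
      by_cases hh : ((pvPrio s).getD "" == "high") <;>
        by_cases hm : ((pvPrio s).getD "" == "medium") <;>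
          by_cases ha : acc < 1 <;>
            simp [hh, hm, ha] <;>
            rw [ih _ (by omega)] <;>
            unfold pvPureLevel <;>
            by_cases h2 : pvAnyPrio rest "high" <;>
              by_cases h3 : pvAnyPrio rest "medium" <;>
                simp [h2, h3] <;> omega

-- ===== VERDICT (by name: the statement is the Claim_ definition above) =====
theorem determine_overall_priority_py_spec : Claim_equal_determine_overall_priority_py := by
  intro suggestions complexity_score _ _
  unfold Spec_determine_overall_priority_py
  unfold determine_overall_priority_py determine_overall_priority_py_alt
  rw [pvSuggLevel_eq_max suggestions 0 (by omega)]
  simp only [Nat.zero_max, pvPureLevel]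
  by_cases hh : pvAnyPrio suggestions "high" <;>
    by_cases hm : pvAnyPrio suggestions "medium" <;>
      by_cases h10 : complexity_score > 10 <;>
        by_cases h5 : complexity_score > 5 <;>
          simp [hh, hm, h10, h5, pvLevelName]
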